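-- pv_equiv track=rewrite | github.com/tcatsuko/AoC2023 | aoc11.py | get_row_expansion
-- ===== SOURCE A (Python) =====
-- def get_row_expansion(galaxy1, galaxy2, empty_rows):
--     row_expansion = 0
--     y1 = galaxy1[1]
--     y2 = galaxy2[1]
--     if y2 > y1:
--         for y in range(y1, y2 + 1):
--             if y in empty_rows:
--                 row_expansion += 1
--     elif y1 > y2:
--         for y in range(y2, y1 + 1):
--             if y in empty_rows:
--                 row_expansion += 1
--     return row_expansion
-- ===== SOURCE B (Python) =====
-- def get_row_expansion(galaxy1, galaxy2, empty_rows):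
--     y1 = galaxy1[1]
--     y2 = galaxy2[1]
--     if y1 == y2:
--         return 0
--     lo, hi = (y1, y2) if y1 < y2 else (y2, y1)
--     return len({r for r in empty_rows if lo <= r <= hi})
-- ===== Notes on version B (the rewrite author's own statement) =====
-- stated objective: faster
-- what changed: Instead of scanning every integer y in the coordinate span and testing list membership, B filters empty_rows once and counts the distinct entries lying in [min(y1,y2), max(y1,y2)].
import Mathlib
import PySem

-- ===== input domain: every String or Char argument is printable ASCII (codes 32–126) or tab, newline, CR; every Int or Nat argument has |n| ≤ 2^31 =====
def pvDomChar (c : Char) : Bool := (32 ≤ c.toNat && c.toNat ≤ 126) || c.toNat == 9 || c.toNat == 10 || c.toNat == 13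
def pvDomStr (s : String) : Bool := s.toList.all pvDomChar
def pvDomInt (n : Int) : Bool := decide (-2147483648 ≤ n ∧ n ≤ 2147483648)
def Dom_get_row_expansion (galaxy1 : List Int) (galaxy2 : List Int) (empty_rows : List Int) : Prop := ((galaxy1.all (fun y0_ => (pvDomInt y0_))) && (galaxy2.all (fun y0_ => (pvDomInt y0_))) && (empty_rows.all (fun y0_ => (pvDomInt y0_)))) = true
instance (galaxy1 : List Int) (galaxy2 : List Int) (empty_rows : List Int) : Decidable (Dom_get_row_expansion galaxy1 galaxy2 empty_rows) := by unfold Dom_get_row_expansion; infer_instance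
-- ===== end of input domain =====

-- B replaces A's scan of every integer in the coordinate span by one filter-and-dedup
-- pass over empty_rows (objective: faster on wide spans).

-- ===== PORT A =====
def get_row_expansion (galaxy1 : List Int) (galaxy2 : List Int) (empty_rows : List Int) : Int :=
  let y1 := PySem.List.pyGetD galaxy1 1 0   -- galaxy1[1]; in range under Pre_
  let y2 := PySem.List.pyGetD galaxy2 1 0   -- galaxy2[1]; in range under Pre_
  if y2 > y1 then
    (PySem.List.pyRange y1 (y2 + 1) 1).foldl
      (fun acc y => if empty_rows.contains y then acc + 1 else acc) 0
  else if y1 > y2 then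
    (PySem.List.pyRange y2 (y1 + 1) 1).foldl
      (fun acc y => if empty_rows.contains y then acc + 1 else acc) 0
  else 0

-- ===== PORT B =====
def get_row_expansion_alt (galaxy1 : List Int) (galaxy2 : List Int) (empty_rows : List Int) : Int :=
  let y1 := PySem.List.pyGetD galaxy1 1 0   -- galaxy1[1]; in range under Pre_
  let y2 := PySem.List.pyGetD galaxy2 1 0   -- galaxy2[1]; in range under Pre_
  if y1 = y2 then 0
  else
    let p := if y1 < y2 then (y1, y2) else (y2, y1)
    -- set comprehension {r for r in empty_rows if lo <= r <= hi}; len(…)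
    ((PySem.Set.ofList (empty_rows.filter (fun r => decide (p.1 ≤ r ∧ r ≤ p.2)))).length : Int)

-- ===== PRECONDITION & SPEC =====
-- Pre_ excludes exactly the inputs where Python A raises IndexError: a galaxy list
-- shorter than 2 has no index 1.
def Pre_get_row_expansion (galaxy1 : List Int) (galaxy2 : List Int) (empty_rows : List Int) : Prop :=
  2 ≤ galaxy1.length ∧ 2 ≤ galaxy2.length
instance (galaxy1 : List Int) (galaxy2 : List Int) (empty_rows : List Int) : Decidable (Pre_get_row_expansion galaxy1 galaxy2 empty_rows) := by unfold Pre_get_row_expansion; infer_instance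
def pvWitness_get_row_expansion : List Int × List Int × List Int := ([0, 1], [0, 4], [2, 3])
def Spec_get_row_expansion (galaxy1 : List Int) (galaxy2 : List Int) (empty_rows : List Int) (out : Int) : Prop := out = get_row_expansion_alt galaxy1 galaxy2 empty_rows
instance (galaxy1 : List Int) (galaxy2 : List Int) (empty_rows : List Int) (out : Int) : Decidable (Spec_get_row_expansion galaxy1 galaxy2 empty_rows out) := by unfold Spec_get_row_expansion; infer_instance

-- ===== CLAIM (what is proved, stated in full; the proofs are below) =====
def Claim_equal_get_row_expansion : Prop := ∀ (galaxy1 : List Int) (galaxy2 : List Int) (empty_rows : List Int), Dom_get_row_expansion galaxy1 galaxy2 empty_rows → Pre_get_row_expansion galaxy1 galaxy2 empty_rows → Spec_get_row_expansion galaxy1 galaxy2 empty_rows (get_row_expansion galaxy1 galaxy2 empty_rows)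

-- ===== LEMMAS AND PROOFS =====

-- the y-scan over [lo, hi] counts exactly the distinct members of empty_rows in [lo, hi]
theorem pv_count_range_eq_set_length (lo hi : Int) (er : List Int) :
    ((PySem.List.pyRange lo (hi + 1) 1).countP (fun y => er.contains y) : Int)
      = ((PySem.Set.ofList (er.filter (fun r => decide (lo ≤ r ∧ r ≤ hi)))).length : Int) := by
  rw [List.countP_eq_length_filter]
  congr 1
  apply List.Perm.length_eq
  rw [List.perm_ext_iff_of_nodup
    ((PySem.List.nodup_pyRange_one lo (hi + 1)).filter _)
    (PySem.Set.nodup_ofList _)]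
  intro a
  simp only [List.mem_filter, PySem.List.mem_pyRange_one, PySem.Set.mem_ofList,
    List.contains_iff_mem, decide_eq_true_eq, Int.lt_add_one_iff]
  tauto

-- ===== VERDICT (by name: the statement is the Claim_ definition above) =====

theorem get_row_expansion_spec : Claim_equal_get_row_expansion := by
  intro galaxy1 galaxy2 empty_rows _ _
  unfold Spec_get_row_expansion get_row_expansion get_row_expansion_alt
  set y1 := PySem.List.pyGetD galaxy1 1 0 with hy1
  set y2 := PySem.List.pyGetD galaxy2 1 0 with hy2
  rcases lt_trichotomy y1 y2 with h | h | h
  · rw [if_pos h, if_neg (by omega), if_pos (by omega),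
      PySem.List.foldl_if_add_one, pv_count_range_eq_set_length]
    simp
  · simp [h]
  · rw [if_neg (by omega), if_pos h, if_neg (by omega), if_neg (by omega),
      PySem.List.foldl_if_add_one, pv_count_range_eq_set_length]
    simp
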